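-- pv_equiv track=rewrite | github.com/Yiseull/python-algorithm-solving | 프로그래머스/3/12938. 최고의 집합/최고의 집합.py | solution
-- ===== SOURCE A (Python) =====
-- def solution(n: int, s: int) -> list:
--     if s < n:
--         return [-1]
--
--     answer = []
--     i = n
--     for _ in range(n):
--         answer.append(s // i)
--         s -= s // i
--         i -= 1
--
--     return answer
-- ===== SOURCE B (Python) =====
-- def solution(n: int, s: int) -> list:
--     if s < n:
--         return [-1]
--     if n <= 0:
--         return []
--     q, r = divmod(s, n)
--     return [q] * (n - r) + [q + 1] * r
-- ===== Notes on version B (the rewrite author's own statement) =====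
-- stated objective: simpler
-- what changed: Replaces the peel-off loop (repeatedly appending s//i and subtracting) with a closed-form arithmetic distribution: q, r = divmod(s, n) and [q]*(n-r) + [q+1]*r, with n <= 0 returning [] directly.
import Mathlib
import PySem

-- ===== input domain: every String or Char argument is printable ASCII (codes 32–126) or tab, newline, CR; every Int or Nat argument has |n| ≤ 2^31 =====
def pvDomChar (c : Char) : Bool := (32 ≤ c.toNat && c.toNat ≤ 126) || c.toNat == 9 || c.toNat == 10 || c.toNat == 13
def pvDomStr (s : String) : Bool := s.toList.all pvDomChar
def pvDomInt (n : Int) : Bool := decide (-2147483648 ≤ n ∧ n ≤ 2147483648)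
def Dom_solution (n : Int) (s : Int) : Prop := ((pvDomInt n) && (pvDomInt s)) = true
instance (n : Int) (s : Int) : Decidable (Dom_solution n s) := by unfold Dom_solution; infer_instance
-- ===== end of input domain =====

-- B replaces A's peel-off loop by the closed-form distribution [q]*(n-r)+[q+1]*r with (q,r) = divmod(s,n): simpler, one division.

-- ===== PORT A =====
-- the 'for _ in range(n)' loop: fuel = remaining iterations, state (s, i)
def solLoopA : Nat → Int → Int → List Int
  | 0, _, _ => []
  | k + 1, s, i => PySem.Int.floordiv s i :: solLoopA k (s - PySem.Int.floordiv s i) (i - 1)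

def solution (n : Int) (s : Int) : List Int :=
  if s < n then [-1]
  else solLoopA n.toNat s n

-- ===== PORT B =====
def solution_alt (n : Int) (s : Int) : List Int :=
  if s < n then [-1]
  else if n ≤ 0 then []
  else
    let q := PySem.Int.floordiv s n
    let r := PySem.Int.mod s n
    List.replicate (n - r).toNat q ++ List.replicate r.toNat (q + 1)

-- ===== PRECONDITION & SPEC =====
def Spec_solution (n : Int) (s : Int) (out : List Int) : Prop := out = solution_alt n s
instance (n : Int) (s : Int) (out : List Int) : Decidable (Spec_solution n s out) := by unfold Spec_solution; infer_instance

-- ===== CLAIM (what is proved, stated in full; the proofs are below) =====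
def Claim_equal_solution : Prop := ∀ (n : Int) (s : Int), Dom_solution n s → Spec_solution n s (solution n s)

-- ===== LEMMAS AND PROOFS =====

lemma solLoopA_closed (k : Nat) : ∀ s : Int,
    solLoopA (k + 1) s ((k : Int) + 1) =
      List.replicate (((k : Int) + 1 - s % ((k : Int) + 1)).toNat) (s / ((k : Int) + 1)) ++
      List.replicate ((s % ((k : Int) + 1)).toNat) (s / ((k : Int) + 1) + 1) := by
  induction k with
  | zero =>
    intro s
    simp [solLoopA, PySem.Int.floordiv]
  | succ k ih =>
    intro s
    push_cast
    have hbpos : (0 : Int) < (k : Int) + 1 + 1 := by positivity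
    set b : Int := (k : Int) + 1 + 1 with hb
    set q : Int := s / b with hq
    set r : Int := s % b with hr
    have hr0 : 0 ≤ r := Int.emod_nonneg s (by omega)
    have hrlt : r < b := Int.emod_lt_of_pos s hbpos
    have hsq : s = b * q + r := by rw [hq, hr]; exact (Int.mul_ediv_add_emod s b).symm
    have hrest : s - q = r + ((k : Int) + 1) * q := by rw [hsq, hb]; ring
    have hfd : PySem.Int.floordiv s b = q := PySem.Int.floordiv_eq_ediv_of_pos hbpos
    have step : solLoopA (k + 1 + 1) s b =
        q :: solLoopA (k + 1) (s - q) ((k : Int) + 1) := by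
      have : b - 1 = (k : Int) + 1 := by omega
      simp [solLoopA, hfd, this]
    rw [step, ih (s - q), hrest]
    have hk1 : ((k : Int) + 1) ≠ 0 := by omega
    rw [Int.add_mul_ediv_left r q hk1, Int.add_mul_emod_self_left]
    by_cases hcase : r = (k : Int) + 1
    · -- remainder fills every smaller slot: s - q is an exact multiple
      rw [hcase]
      have h1 : ((k : Int) + 1) / ((k : Int) + 1) = 1 := Int.ediv_self hk1
      have h2 : ((k : Int) + 1) % ((k : Int) + 1) = 0 := by simp
      rw [h1, h2]
      have hA : (b - ((k : Int) + 1)).toNat = 1 := by omega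
      have hB : ((k : Int) + 1 - 0).toNat = k + 1 := by omega
      have hC : (((k : Int) + 1)).toNat = k + 1 := by omega
      simp [hA, hC, List.replicate_succ]
      omega
    · -- remainder stays below the new divisor
      have hrk : r < (k : Int) + 1 := by omega
      have h1 : r / ((k : Int) + 1) = 0 := Int.ediv_eq_zero_of_lt hr0 hrk
      have h2 : r % ((k : Int) + 1) = r := Int.emod_eq_of_lt hr0 hrk
      rw [h1, h2]
      have hA : (b - r).toNat = ((k : Int) + 1 - r).toNat + 1 := by omega
      simp [hA, List.replicate_succ]

theorem solution_eq_alt (n s : Int) : solution n s = solution_alt n s := by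
  unfold solution solution_alt
  by_cases hlt : s < n
  · simp [hlt]
  · simp only [hlt, if_false]
    by_cases hn : n ≤ 0
    · have : n.toNat = 0 := by omega
      simp [hn, this, solLoopA]
    · have hnpos : 0 < n := by omega
      obtain ⟨k, hk⟩ : ∃ k : Nat, n = (k : Int) + 1 := ⟨n.toNat - 1, by omega⟩
      simp only [hn, if_false]
      rw [PySem.Int.floordiv_eq_ediv_of_pos hnpos, PySem.Int.mod_eq_emod_of_pos hnpos]
      have hfuel : n.toNat = k + 1 := by omega
      rw [hfuel, hk, solLoopA_closed]

-- ===== VERDICT (by name: the statement is the Claim_ definition above) =====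
theorem solution_spec : Claim_equal_solution := by
  unfold Claim_equal_solution Spec_solution
  exact fun n s _ => solution_eq_alt n s
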